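-- pv_equiv track=rewrite | github.com/mounikayacham/solvedProblems | Difficulty: Medium/Reverse array in groups/reverse-array-in-groups.py | reverseingroups
-- ===== SOURCE A (Python) =====
-- def reverseingroups(arr, k):
--     #code here
--     n = len(arr)
--     for i in range(0, n, k):
--         left = i
--         right = min(i + k - 1, n - 1)
--         while left < right:
--             arr[left], arr[right] = arr[right], arr[left]
--             left += 1
--             right -= 1
--     return arr
-- ===== SOURCE B (Python) =====
-- def reverseingroups(arr, k):
--     # Reverse arr in groups of k by rebuilding the contents chunk-by-chunk,
--     # then writing them back in place (slice assignment keeps aliasing like A).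
--     if k > 0:
--         out = []
--         rest = arr[:]
--         while rest:
--             out.extend(reversed(rest[:k]))
--             rest = rest[k:]
--         arr[:] = out
--     return arr
-- ===== Notes on version B (the rewrite author's own statement) =====
-- stated objective: alternative
-- what changed: B replaces A's index arithmetic (outer index loop plus inner two-pointer swap loop over the shared array) with a chunk-consuming loop that slices off the next group, reverses it, and appends it to an output list written back in place; no in-place swaps or index bookkeeping remain.
-- outside the precondition, e.g. on reverseingroups([1, 2, 3], 0): A raises ValueError, B returns [1, 2, 3]
import Mathlib
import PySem

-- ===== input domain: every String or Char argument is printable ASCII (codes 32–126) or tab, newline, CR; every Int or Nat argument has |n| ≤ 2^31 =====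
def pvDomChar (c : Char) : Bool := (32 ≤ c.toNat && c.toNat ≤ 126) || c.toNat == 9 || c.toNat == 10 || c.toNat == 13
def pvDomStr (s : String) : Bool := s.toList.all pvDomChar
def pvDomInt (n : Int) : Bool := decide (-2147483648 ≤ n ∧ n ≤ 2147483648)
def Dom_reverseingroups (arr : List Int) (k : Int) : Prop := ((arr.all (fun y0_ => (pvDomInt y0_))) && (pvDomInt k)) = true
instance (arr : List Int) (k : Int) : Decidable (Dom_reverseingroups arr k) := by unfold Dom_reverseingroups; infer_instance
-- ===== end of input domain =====

-- B rebuilds the array chunk-by-chunk (slice off the next group, reverse it, append) instead of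
-- A's index loop with an inner two-pointer swap loop; same cost, no index bookkeeping.
-- Both Pythons mutate arr in place and return it; the equivalence proved here is about the return value.

-- ===== PORT A =====
-- the simultaneous assignment arr[left], arr[right] = arr[right], arr[left];
-- the loop only reaches nonnegative in-range indices, so .toNat is exact there
def pvSwap2 (a : List Int) (l r : Int) : List Int :=
  let vl := PySem.List.pyGetD a l 0
  let vr := PySem.List.pyGetD a r 0
  (a.set l.toNat vr).set r.toNat vl

-- the inner 'while left < right' loop
def pvSwapLoop (a : List Int) (l r : Int) : List Int :=
  if l < r then pvSwapLoop (pvSwap2 a l r) (l + 1) (r - 1) else a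
termination_by (r - l).toNat
decreasing_by omega

def reverseingroups (arr : List Int) (k : Int) : List Int :=
  let n : Int := arr.length
  (PySem.List.pyRange 0 n k).foldl
    (fun a i => pvSwapLoop a i (min (i + k - 1) (n - 1))) arr

-- ===== PORT B =====
-- the 'while rest:' loop of Source B; it only runs with chunk size k ≥ 1, where
-- rest[:k] = x :: t.take (k-1) and rest[k:] = t.drop (k-1) on rest = x :: t
def pvChunks (k : Nat) (out : List Int) : List Int → List Int
  | [] => out
  | x :: t => pvChunks k (out ++ (x :: t.take (k - 1)).reverse) (t.drop (k - 1))
termination_by rest => rest.length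
decreasing_by simp

def reverseingroups_alt (arr : List Int) (k : Int) : List Int :=
  if k > 0 then pvChunks k.toNat [] arr else arr

-- ===== PRECONDITION & SPEC =====
-- Pre_ excludes exactly k = 0, on which Python A raises ValueError (range() with step 0).
def Pre_reverseingroups (arr : List Int) (k : Int) : Prop := k ≠ 0
instance (arr : List Int) (k : Int) : Decidable (Pre_reverseingroups arr k) := by unfold Pre_reverseingroups; infer_instance
def pvWitness_reverseingroups : List Int × Int := ([1, 2, 3, 4, 5], 2)

def Spec_reverseingroups (arr : List Int) (k : Int) (out : List Int) : Prop := out = reverseingroups_alt arr k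
instance (arr : List Int) (k : Int) (out : List Int) : Decidable (Spec_reverseingroups arr k out) := by unfold Spec_reverseingroups; infer_instance

-- ===== CLAIM (what is proved, stated in full; the proofs are below) =====
def Claim_equal_reverseingroups : Prop := ∀ (arr : List Int) (k : Int), Dom_reverseingroups arr k → Pre_reverseingroups arr k → Spec_reverseingroups arr k (reverseingroups arr k)

-- ===== LEMMAS AND PROOFS =====

-- List.range (n+1) as a cons (Mathlib's range_succ appends at the right end)
theorem pvRangeSucc (n : Nat) : List.range (n + 1) = 0 :: (List.range n).map (· + 1) := by
  induction n with
  | zero => rfl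
  | succ m ih =>
    conv_rhs => rw [List.range_succ]
    rw [List.range_succ, ih]
    simp

-- pyRange with a positive step: empty / cons decomposition
theorem pvRange_pos_nil (a b k : Int) (hk : 0 < k) (hab : b ≤ a) :
    PySem.List.pyRange a b k = [] := by
  rw [PySem.List.pyRange_of_pos a b hk]
  simp [show ¬ a < b by omega]

theorem pvRange_pos_cons (a b k : Int) (hk : 0 < k) (hab : a < b) :
    PySem.List.pyRange a b k = a :: PySem.List.pyRange (a + k) b k := by
  rw [PySem.List.pyRange_of_pos a b hk, PySem.List.pyRange_of_pos (a + k) b hk]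
  by_cases hc : a + k < b
  · have h1 : (b - a + k - 1) = (b - (a + k) + k - 1) + 1 * k := by ring
    have h2 : (b - a + k - 1) / k = (b - (a + k) + k - 1) / k + 1 := by
      rw [h1, Int.add_mul_ediv_right _ _ (by omega : k ≠ 0)]
    have h3 : (0:Int) ≤ (b - (a + k) + k - 1) / k := Int.ediv_nonneg (by omega) (by omega)
    rw [if_pos hab, if_pos hc, h2]
    rw [show ((b - (a + k) + k - 1) / k + 1).toNat = ((b - (a + k) + k - 1) / k).toNat + 1 by omega]
    rw [pvRangeSucc, List.map_cons, List.map_map]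
    congr 1
    · simp
    · apply List.map_congr_left
      intro j _
      simp only [Function.comp]
      push_cast
      ring
  · have h0 : b - a - 1 < k := by omega
    have h2 : (b - a + k - 1) / k = 1 := by
      have : (b - a + k - 1) = (b - a - 1) + 1 * k := by ring
      rw [this, Int.add_mul_ediv_right _ _ (by omega : k ≠ 0),
          Int.ediv_eq_zero_of_lt (by omega) h0]
      omega
    rw [if_pos hab, if_neg hc, h2]
    simp

-- pyRange with a negative step and b ≥ a is empty
theorem pvRange_neg_nil (a b k : Int) (hk : k < 0) (hab : a ≤ b) :
    PySem.List.pyRange a b k = [] := by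
  unfold PySem.List.pyRange
  simp [show k ≠ 0 by omega, show ¬ 0 < k by omega, show ¬ b < a by omega]

-- one simultaneous swap on a decomposed list
theorem pvSwap2_append (p m q : List Int) (x w : Int) :
    pvSwap2 (p ++ x :: m ++ w :: q) p.length (p.length + m.length + 1)
      = p ++ w :: m ++ x :: q := by
  unfold pvSwap2
  have e1 : PySem.List.pyGetD (p ++ x :: m ++ w :: q) (p.length) 0 = x := by
    rw [PySem.List.pyGetD_of_nonneg _ _ (by positivity)]
    simp [List.getD_eq_getElem?_getD]
  have e2 : PySem.List.pyGetD (p ++ x :: m ++ w :: q) (p.length + m.length + 1) 0 = w := by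
    rw [PySem.List.pyGetD_of_nonneg _ _ (by positivity)]
    have ht : ((p.length : Int) + m.length + 1).toNat = p.length + (m.length + 1) := by omega
    rw [ht]
    rw [show p ++ x :: m ++ w :: q = (p ++ x :: m) ++ w :: q by simp]
    rw [List.getD_eq_getElem?_getD,
        List.getElem?_append_right (by simp)]
    simp
  rw [e1, e2]
  have ht1 : ((p.length : Int)).toNat = p.length := by omega
  have ht2 : ((p.length : Int) + m.length + 1).toNat = p.length + (m.length + 1) := by omega
  rw [ht1, ht2]
  show ((p ++ x :: m ++ w :: q).set p.length w).set (p.length + (m.length + 1)) x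
      = p ++ w :: m ++ x :: q
  simp only [List.set_append]
  rw [if_pos (by simp), if_neg (by omega), Nat.sub_self, List.set_cons_zero]
  rw [List.set_append, if_neg (by simp only [List.length_append, List.length_cons]; omega)]
  rw [show p.length + (m.length + 1) - (p ++ w :: m).length = 0 by
        simp only [List.length_append, List.length_cons]; omega]
  rw [List.set_cons_zero]

-- the inner while loop reverses exactly the segment it is pointed at
theorem pvSwapLoop_reverses (n : Nat) : ∀ (s p q : List Int), s.length = n →
    pvSwapLoop (p ++ s ++ q) p.length (p.length + s.length - 1)
      = p ++ s.reverse ++ q := by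
  induction n using Nat.strong_induction_on with
  | _ n IH =>
    intro s p q hn
    by_cases h2 : s.length ≤ 1
    · rw [pvSwapLoop, if_neg (by omega)]
      interval_cases hl : s.length
      · simp at hl; subst hl; simp
      · rcases s with _ | ⟨a, _ | _⟩ <;> simp_all
    · rcases s with _ | ⟨x, t⟩
      · simp at h2
      have ht : t ≠ [] := by intro h; subst h; simp at h2
      obtain ⟨m', w, htw⟩ : ∃ m' w, t = m' ++ [w] :=
        ⟨t.dropLast, t.getLast ht, (List.dropLast_append_getLast ht).symm⟩
      subst htw
      have hlen : (x :: (m' ++ [w])).length = m'.length + 2 := by simp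
      rw [pvSwapLoop, if_pos (by push_cast [hlen]; omega)]
      have hshape : p ++ x :: (m' ++ [w]) ++ q = p ++ x :: m' ++ w :: q := by simp
      have hr : (p.length : Int) + (x :: (m' ++ [w])).length - 1
          = (p.length : Int) + m'.length + 1 := by push_cast [hlen]; omega
      rw [hshape, hr, pvSwap2_append]
      have hshape2 : p ++ w :: m' ++ x :: q = (p ++ [w]) ++ m' ++ (x :: q) := by simp
      have hl2 : (p.length : Int) + 1 = ((p ++ [w]).length : Int) := by simp
      have hr2 : (p.length : Int) + m'.length + 1 - 1
          = ((p ++ [w]).length : Int) + m'.length - 1 := by omega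
      rw [hshape2, hl2, hr2, IH m'.length (by simp at hn ⊢; omega) m' (p ++ [w]) (x :: q) rfl]
      simp

-- the accumulator of pvChunks factors out
theorem pvChunks_append (k : Nat) : ∀ (n : Nat) (o o' rest : List Int), rest.length = n →
    pvChunks k (o ++ o') rest = o ++ pvChunks k o' rest := by
  intro n
  induction n using Nat.strong_induction_on with
  | _ n IH =>
    intro o o' rest hn
    match rest with
    | [] => simp [pvChunks]
    | x :: t =>
      rw [pvChunks, pvChunks, List.append_assoc]
      exact IH (t.drop (k - 1)).length (by simp at hn ⊢; omega) _ _ _ rfl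

-- main invariant: A's outer loop from position |done| equals done ++ B's chunking of the rest
theorem pvMain (k : Int) (hk : 0 < k) : ∀ (n : Nat) (a done : List Int), a.length = n →
    (PySem.List.pyRange done.length (done.length + a.length) k).foldl
      (fun acc i => pvSwapLoop acc i (min (i + k - 1) (done.length + a.length - 1))) (done ++ a)
      = done ++ pvChunks k.toNat [] a := by
  intro n
  induction n using Nat.strong_induction_on with
  | _ n IH =>
    intro a done hn
    rcases a with _ | ⟨x, t⟩
    · rw [show (done.length : Int) + ([] : List Int).length = done.length by simp,
          pvRange_pos_nil _ _ k hk le_rfl]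
      simp [pvChunks]
    · have hc : (done.length : Int) < done.length + (x :: t).length := by
        simp
      rw [pvRange_pos_cons _ _ _ hk hc, List.foldl_cons]
      -- the first outer iteration reverses the first chunk in place
      set mN : Nat := min k.toNat (x :: t).length with hmN
      set s : List Int := (x :: t).take mN with hs
      set q : List Int := (x :: t).drop mN with hq
      have hm1 : 1 ≤ mN := by simp [hmN]; omega
      have hsl : s.length = mN := by
        rw [hs, List.length_take]; simp [hmN]
      have hsq : done ++ (x :: t) = done ++ s ++ q := by
        rw [List.append_assoc, hs, hq, List.take_append_drop]
      have hmin : min ((done.length : Int) + k - 1) ((done.length : Int) + (x :: t).length - 1)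
          = (done.length : Int) + s.length - 1 := by
        rw [hsl, hmN, Nat.cast_min, Int.toNat_of_nonneg hk.le]
        rcases le_total k (((x :: t).length : Nat) : Int) with h | h
        · rw [min_eq_left h, min_eq_left (by omega)]
        · rw [min_eq_right h, min_eq_right (by omega)]
      rw [hsq, hmin, pvSwapLoop_reverses s.length s done q rfl]
      by_cases hkle : k ≤ ((x :: t).length : Int)
      · -- full chunk: recurse on the rest with done' = done ++ s.reverse
        have hmk : mN = k.toNat := by
          rw [hmN]
          exact min_eq_left (by omega)
        have e1 : (done.length : Int) + k = (((done ++ s.reverse).length : Nat) : Int) := by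
          simp only [List.length_append, List.length_reverse, hsl, hmk]
          omega
        have e2 : (done.length : Int) + ((x :: t).length : Int)
            = (((done ++ s.reverse).length : Nat) : Int) + (q.length : Int) := by
          have hql : q.length = (x :: t).length - mN := by rw [hq, List.length_drop]
          simp only [List.length_append, List.length_reverse, hsl, hmk, hql]
          omega
        rw [show done ++ s.reverse ++ q = (done ++ s.reverse) ++ q from rfl, e1, e2,
            IH q.length (by rw [hq, List.length_drop]; simp at hn ⊢; omega) q (done ++ s.reverse) rfl]
        -- fold the first chunk back into pvChunks
        obtain ⟨j, hj⟩ : ∃ j, k.toNat = j + 1 := ⟨k.toNat - 1, by omega⟩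
        have hsx : s = x :: t.take (k.toNat - 1) := by
          rw [hs, hmk, hj, List.take_succ_cons]
          simp
        have hqx : q = t.drop (k.toNat - 1) := by
          rw [hq, hmk, hj, List.drop_succ_cons]
          simp
        rw [show pvChunks k.toNat [] (x :: t)
              = pvChunks k.toNat ([] ++ (x :: t.take (k.toNat - 1)).reverse) (t.drop (k.toNat - 1)) from by
                rw [pvChunks],
            List.nil_append,
            show (x :: t.take (k.toNat - 1)).reverse = s.reverse ++ [] by rw [hsx]; simp,
            ← hqx, pvChunks_append k.toNat q.length s.reverse [] q rfl]
        simp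
      · -- partial last chunk: the remaining range is empty
        have hmk : mN = (x :: t).length := by
          rw [hmN]
          exact min_eq_right (by omega)
        have hsfull : s = x :: t := by rw [hs, hmk]; simp
        have hqnil : q = [] := by rw [hq, hmk]; simp
        rw [pvRange_pos_nil ((done.length : Int) + k) ((done.length : Int) + ((x :: t).length : Nat)) k hk (by omega)]
        simp only [List.foldl_nil]
        have hchunk : pvChunks k.toNat [] (x :: t) = (x :: t).reverse := by
          rw [pvChunks, show t.take (k.toNat - 1) = t by
                apply List.take_of_length_le; simp at hkle ⊢; omega,
              show t.drop (k.toNat - 1) = [] by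
                apply List.drop_eq_nil_of_le; simp at hkle ⊢; omega]
          rw [pvChunks]
          simp
        rw [hchunk, hsfull, hqnil]
        simp

-- ===== VERDICT (by name: the statement is the Claim_ definition above) =====
theorem reverseingroups_spec : Claim_equal_reverseingroups := by
  intro arr k _ hpre
  unfold Spec_reverseingroups reverseingroups reverseingroups_alt
  rcases lt_trichotomy k 0 with hneg | hz | hpos
  · rw [if_neg (by omega)]
    show (PySem.List.pyRange 0 ((arr.length : Nat) : Int) k).foldl
        (fun a i => pvSwapLoop a i (min (i + k - 1) (((arr.length : Nat) : Int) - 1))) arr = arr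
    rw [pvRange_neg_nil 0 arr.length k hneg (by omega)]
    rfl
  · exact absurd hz hpre
  · rw [if_pos hpos]
    have := pvMain k hpos arr.length arr [] rfl
    simpa using this
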